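-- pv_equiv track=rewrite | github.com/LX-530/Qmix | offpolicy/envs/CA/robot_env.py | _find_best_position_near_target
-- ===== SOURCE A (Python) =====
-- def _find_best_position_near_target(target, available_positions, min_dist, max_dist):
--     """在目标附近找到最佳位置"""
--     tx, ty = target
--     candidates = []
--
--     # 寻找在理想距离范围内的位置
--     for pos in available_positions:
--         px, py = pos
--         dist = max(abs(px - tx), abs(py - ty))
--         if min_dist <= dist <= max_dist:
--             candidates.append((pos, dist))
--
--     if candidates:
--         # 选择距离最接近理想值的位置（理想值为min_dist + 1）
--         ideal_dist = min_dist + 1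
--         best_pos = min(candidates, key=lambda x: abs(x[1] - ideal_dist))[0]
--         return best_pos
--
--     # 如果没有理想位置，选择最近的可用位置
--     if available_positions:
--         nearest_pos = min(available_positions,
--                         key=lambda pos: max(abs(pos[0] - tx), abs(pos[1] - ty)))
--         return nearest_pos
--
--     return None
-- ===== SOURCE B (Python) =====
-- def _find_best_position_near_target(target, available_positions, min_dist, max_dist):
--     """Sort-based: stable-sort by a two-tier key (in-range first by |dist-ideal|,
--     out-of-range by dist) and take the head."""
--     tx, ty = target
--
--     def rank(pos):
--         d = max(abs(pos[0] - tx), abs(pos[1] - ty))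
--         if min_dist <= d <= max_dist:
--             return (0, abs(d - (min_dist + 1)))
--         return (1, d)
--
--     ordered = sorted(available_positions, key=rank)
--     return ordered[0] if ordered else None
-- ===== Notes on version B (the rewrite author's own statement) =====
-- stated objective: alternative
-- what changed: Replaced the filter-then-two-min-scans with a stable sort of all positions under a two-tier key ((0,|dist-ideal|) for in-range, (1,dist) for out-of-range) followed by taking the head; stability makes the head the first minimum, matching min's first-wins tie-breaking, and the tier ordering makes the out-of-range nearest fallback automatic.
import Mathlib
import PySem

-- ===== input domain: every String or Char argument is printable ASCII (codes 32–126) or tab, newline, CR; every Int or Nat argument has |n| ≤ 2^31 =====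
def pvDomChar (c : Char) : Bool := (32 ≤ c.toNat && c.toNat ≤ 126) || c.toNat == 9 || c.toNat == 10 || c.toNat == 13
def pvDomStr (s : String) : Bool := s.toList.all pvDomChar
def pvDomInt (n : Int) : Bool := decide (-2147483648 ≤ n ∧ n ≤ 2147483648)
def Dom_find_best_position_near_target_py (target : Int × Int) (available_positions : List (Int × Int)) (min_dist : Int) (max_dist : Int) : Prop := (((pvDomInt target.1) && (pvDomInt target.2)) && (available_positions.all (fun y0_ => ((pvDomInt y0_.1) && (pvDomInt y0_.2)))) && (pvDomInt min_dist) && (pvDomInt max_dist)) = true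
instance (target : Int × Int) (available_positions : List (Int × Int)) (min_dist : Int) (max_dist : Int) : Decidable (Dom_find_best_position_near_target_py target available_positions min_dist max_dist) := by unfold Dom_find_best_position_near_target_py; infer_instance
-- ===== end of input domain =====

-- B replaces A's filter-plus-two-min-scans by one stable sort under a two-tier key
-- ((0,|dist-ideal|) in range, (1,dist) outside) followed by taking the head; same results.

-- ===== PORT A =====
def find_best_position_near_target_py (target : Int × Int) (available_positions : List (Int × Int)) (min_dist : Int) (max_dist : Int) : Option (Int × Int) :=
  let tx := target.1
  let ty := target.2
  let candidates : List ((Int × Int) × Int) := available_positions.foldl (fun acc pos =>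
      let dist := max |pos.1 - tx| |pos.2 - ty|
      if min_dist ≤ dist ∧ dist ≤ max_dist then acc ++ [(pos, dist)] else acc) []
  if candidates ≠ [] then
    let ideal_dist := min_dist + 1
    (PySem.List.min? candidates (fun x => |x.2 - ideal_dist|)).map (fun x => x.1)
  else if available_positions ≠ [] then
    PySem.List.min? available_positions (fun pos => max |pos.1 - tx| |pos.2 - ty|)
  else none

-- ===== PORT B =====
-- Source B's rank(pos) returns a 2-tuple; its two components, for PySem.List.sorted2.
def pvRank1 (tx ty min_dist max_dist : Int) (pos : Int × Int) : Int :=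
  if min_dist ≤ max |pos.1 - tx| |pos.2 - ty| ∧ max |pos.1 - tx| |pos.2 - ty| ≤ max_dist then 0 else 1

def pvRank2 (tx ty min_dist max_dist : Int) (pos : Int × Int) : Int :=
  if min_dist ≤ max |pos.1 - tx| |pos.2 - ty| ∧ max |pos.1 - tx| |pos.2 - ty| ≤ max_dist then
    |max |pos.1 - tx| |pos.2 - ty| - (min_dist + 1)| else max |pos.1 - tx| |pos.2 - ty|

def find_best_position_near_target_py_alt (target : Int × Int) (available_positions : List (Int × Int)) (min_dist : Int) (max_dist : Int) : Option (Int × Int) :=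
  let tx := target.1
  let ty := target.2
  let ordered := PySem.List.sorted2 available_positions (pvRank1 tx ty min_dist max_dist) (pvRank2 tx ty min_dist max_dist)
  ordered.head?

-- ===== PRECONDITION & SPEC =====
def Spec_find_best_position_near_target_py (target : Int × Int) (available_positions : List (Int × Int)) (min_dist : Int) (max_dist : Int) (out : Option (Int × Int)) : Prop := out = find_best_position_near_target_py_alt target available_positions min_dist max_dist
instance (target : Int × Int) (available_positions : List (Int × Int)) (min_dist : Int) (max_dist : Int) (out : Option (Int × Int)) : Decidable (Spec_find_best_position_near_target_py target available_positions min_dist max_dist out) := by unfold Spec_find_best_position_near_target_py; infer_instance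

-- ===== CLAIM (what is proved, stated in full; the proofs are below) =====
def Claim_equal_find_best_position_near_target_py : Prop := ∀ (target : Int × Int) (available_positions : List (Int × Int)) (min_dist : Int) (max_dist : Int), Dom_find_best_position_near_target_py target available_positions min_dist max_dist → Spec_find_best_position_near_target_py target available_positions min_dist max_dist (find_best_position_near_target_py target available_positions min_dist max_dist)

-- ===== LEMMAS AND PROOFS =====

-- Running strict-< best keyed by `k`, exactly min?'s loop step.
def pvPick {α : Type} (k : α → Int) (b : Option α) (x : α) : Option α :=
  match b with
  | none => some x
  | some m => if k x < k m then some x else some m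

theorem pvFold_eq_min? {α : Type} (k : α → Int) (l : List α) :
    l.foldl (pvPick k) none = PySem.List.min? l k := by
  unfold PySem.List.min?
  congr 1

theorem pvMin?Map_aux {α β : Type} (f : α → β) (key : β → Int) :
    ∀ (l : List α) (a : Option α),
      (l.map f).foldl (pvPick key) (a.map f)
        = (l.foldl (pvPick (fun x => key (f x))) a).map f := by
  intro l
  induction l with
  | nil => intro a; rfl
  | cons x xs ih =>
      intro a
      cases a with
      | none => simpa [pvPick] using ih (some x)
      | some m =>
          by_cases h : key (f x) < key (f m)
          · simpa [pvPick, h] using ih (some x)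
          · simpa [pvPick, h] using ih (some m)

-- min? over a mapped list is min? of the composed key, mapped.
theorem pvMin?Map {α β : Type} (f : α → β) (key : β → Int) (l : List α) :
    PySem.List.min? (l.map f) key = (PySem.List.min? l (fun x => key (f x))).map f := by
  rw [← pvFold_eq_min? key (l.map f), ← pvFold_eq_min? (fun x => key (f x)) l]
  simpa using pvMin?Map_aux f key l none

-- A's candidate-building loop is filter-then-map.
theorem pvCandidates (tx ty mn mx : Int) :
    ∀ (l : List (Int × Int)) (acc : List ((Int × Int) × Int)),
      l.foldl (fun acc pos =>
          let dist := max |pos.1 - tx| |pos.2 - ty|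
          if mn ≤ dist ∧ dist ≤ mx then acc ++ [(pos, dist)] else acc) acc
        = acc ++ ((l.filter (fun pos => decide (mn ≤ max |pos.1 - tx| |pos.2 - ty| ∧ max |pos.1 - tx| |pos.2 - ty| ≤ mx))).map
            (fun pos => (pos, max |pos.1 - tx| |pos.2 - ty|))) := by
  intro l
  induction l with
  | nil => intro acc; simp
  | cons x xs ih =>
      intro acc
      by_cases hp : mn ≤ max |x.1 - tx| |x.2 - ty| ∧ max |x.1 - tx| |x.2 - ty| ≤ mx
      · simpa only [List.foldl_cons, List.filter_cons, decide_eq_true_eq, if_pos hp,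
          List.map_cons, List.append_assoc, List.singleton_append] using
          ih (acc ++ [(x, max |x.1 - tx| |x.2 - ty|)])
      · simpa only [List.foldl_cons, List.filter_cons, decide_eq_true_eq, if_neg hp] using ih acc

-- The running head of an insertion sort: head-or-new-element by the `before` test.
def pvPickB {α : Type} (bef : α → α → Bool) (m : Option α) (x : α) : Option α :=
  match m with
  | none => some x
  | some y => if bef x y then some x else some y

theorem pvHead_insertBy {α : Type} (bef : α → α → Bool) (x : α) (acc : List α) :
    (PySem.List.insertBy bef x acc).head? = pvPickB bef acc.head? x := by
  cases acc with
  | nil => rfl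
  | cons y ys =>
      by_cases h : bef x y
      · simp [PySem.List.insertBy, pvPickB, h]
      · simp [PySem.List.insertBy, pvPickB, h]

theorem pvHeadFold {α : Type} (bef : α → α → Bool) :
    ∀ (xs : List α) (acc : List α),
      (xs.foldl (fun a x => PySem.List.insertBy bef x a) acc).head? = xs.foldl (pvPickB bef) acc.head? := by
  intro xs
  induction xs with
  | nil => intro acc; rfl
  | cons x t ih =>
      intro acc
      simp only [List.foldl_cons]
      rw [ih (PySem.List.insertBy bef x acc), pvHead_insertBy]

-- sorted2's lexicographic `before` test, on B's two rank components.
def pvBef (tx ty mn mx : Int) (a b : Int × Int) : Bool :=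
  decide (pvRank1 tx ty mn mx a < pvRank1 tx ty mn mx b) ||
    (!decide (pvRank1 tx ty mn mx b < pvRank1 tx ty mn mx a) &&
      decide (pvRank2 tx ty mn mx a < pvRank2 tx ty mn mx b))

theorem pvSorted2_eq (tx ty mn mx : Int) (xs : List (Int × Int)) :
    PySem.List.sorted2 xs (pvRank1 tx ty mn mx) (pvRank2 tx ty mn mx)
      = xs.foldl (fun acc x => PySem.List.insertBy (pvBef tx ty mn mx) x acc) [] := rfl

-- Merge of the two running bests A maintains (in-range best, overall nearest).
def pvPhi (b n : Option (Int × Int)) : Option (Int × Int) :=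
  match b with
  | some y => some y
  | none => n

-- pvBef evaluated on the four in-range/out-of-range combinations.
theorem pvBef_in_in (tx ty mn mx : Int) (x y : Int × Int)
    (hx : mn ≤ max |x.1 - tx| |x.2 - ty| ∧ max |x.1 - tx| |x.2 - ty| ≤ mx)
    (hy : mn ≤ max |y.1 - tx| |y.2 - ty| ∧ max |y.1 - tx| |y.2 - ty| ≤ mx) :
    pvBef tx ty mn mx x y = decide (|max |x.1 - tx| |x.2 - ty| - (mn + 1)| < |max |y.1 - tx| |y.2 - ty| - (mn + 1)|) := by
  unfold pvBef pvRank1 pvRank2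
  rw [if_pos hx, if_pos hy, if_pos hx, if_pos hy]
  simp

theorem pvBef_in_out (tx ty mn mx : Int) (x y : Int × Int)
    (hx : mn ≤ max |x.1 - tx| |x.2 - ty| ∧ max |x.1 - tx| |x.2 - ty| ≤ mx)
    (hy : ¬ (mn ≤ max |y.1 - tx| |y.2 - ty| ∧ max |y.1 - tx| |y.2 - ty| ≤ mx)) :
    pvBef tx ty mn mx x y = true := by
  unfold pvBef pvRank1 pvRank2
  rw [if_pos hx, if_neg hy]
  simp

theorem pvBef_out_in (tx ty mn mx : Int) (x y : Int × Int)
    (hx : ¬ (mn ≤ max |x.1 - tx| |x.2 - ty| ∧ max |x.1 - tx| |x.2 - ty| ≤ mx))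
    (hy : mn ≤ max |y.1 - tx| |y.2 - ty| ∧ max |y.1 - tx| |y.2 - ty| ≤ mx) :
    pvBef tx ty mn mx x y = false := by
  unfold pvBef pvRank1 pvRank2
  rw [if_neg hx, if_pos hy]
  simp

theorem pvBef_out_out (tx ty mn mx : Int) (x y : Int × Int)
    (hx : ¬ (mn ≤ max |x.1 - tx| |x.2 - ty| ∧ max |x.1 - tx| |x.2 - ty| ≤ mx))
    (hy : ¬ (mn ≤ max |y.1 - tx| |y.2 - ty| ∧ max |y.1 - tx| |y.2 - ty| ≤ mx)) :
    pvBef tx ty mn mx x y = decide (max |x.1 - tx| |x.2 - ty| < max |y.1 - tx| |y.2 - ty|) := by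
  unfold pvBef pvRank1 pvRank2
  rw [if_neg hx, if_neg hy, if_neg hx, if_neg hy]
  simp

-- The lex running min equals pvPhi of A's two running mins, for reachable states.
theorem pvMain (tx ty mn mx : Int) :
    ∀ (xs : List (Int × Int)) (b n : Option (Int × Int)),
      (∀ y, b = some y → mn ≤ max |y.1 - tx| |y.2 - ty| ∧ max |y.1 - tx| |y.2 - ty| ≤ mx) →
      (b = none → ∀ m, n = some m → ¬ (mn ≤ max |m.1 - tx| |m.2 - ty| ∧ max |m.1 - tx| |m.2 - ty| ≤ mx)) →
      (n = none → b = none) →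
      xs.foldl (pvPickB (pvBef tx ty mn mx)) (pvPhi b n)
        = pvPhi ((xs.filter (fun pos => decide (mn ≤ max |pos.1 - tx| |pos.2 - ty| ∧ max |pos.1 - tx| |pos.2 - ty| ≤ mx))).foldl
              (pvPick (fun p => |max |p.1 - tx| |p.2 - ty| - (mn + 1)|)) b)
            (xs.foldl (pvPick (fun p => max |p.1 - tx| |p.2 - ty|)) n) := by
  intro xs
  induction xs with
  | nil => intro b n _ _ _; rfl
  | cons x t ih =>
      intro b n hb hn hnb
      by_cases hx : mn ≤ max |x.1 - tx| |x.2 - ty| ∧ max |x.1 - tx| |x.2 - ty| ≤ mx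
      · -- x is in range: it joins the filtered fold
        have step : pvPickB (pvBef tx ty mn mx) (pvPhi b n) x
            = pvPhi (pvPick (fun p => |max |p.1 - tx| |p.2 - ty| - (mn + 1)|) b x) (pvPick (fun p => max |p.1 - tx| |p.2 - ty|) n x) := by
          cases b with
          | some y =>
              have hy := hb y rfl
              simp only [pvPickB, pvPhi, pvPick, pvBef_in_in tx ty mn mx x y hx hy]
              by_cases hlt : |max |x.1 - tx| |x.2 - ty| - (mn + 1)| < |max |y.1 - tx| |y.2 - ty| - (mn + 1)| <;>
                simp [hlt]
          | none =>
              cases n with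
              | none => simp [pvPickB, pvPhi, pvPick]
              | some m =>
                  have hm := hn rfl m rfl
                  simp only [pvPickB, pvPhi, pvPick, pvBef_in_out tx ty mn mx x m hx hm]
                  simp
        rw [List.foldl_cons, step]
        have := ih (pvPick (fun p => |max |p.1 - tx| |p.2 - ty| - (mn + 1)|) b x)
          (pvPick (fun p => max |p.1 - tx| |p.2 - ty|) n x)
          (by
            intro y hy
            cases b with
            | none => simp [pvPick] at hy; exact hy ▸ hx
            | some z =>
                have hz := hb z rfl
                by_cases hlt : |max |x.1 - tx| |x.2 - ty| - (mn + 1)| < |max |z.1 - tx| |z.2 - ty| - (mn + 1)|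
                · simp [pvPick, hlt] at hy; exact hy ▸ hx
                · simp [pvPick, hlt] at hy; exact hy ▸ hz)
          (by
            intro hbe
            exfalso
            cases b with
            | none => simp [pvPick] at hbe
            | some z =>
                simp only [pvPick] at hbe
                split_ifs at hbe)
          (by
            intro hne
            exfalso
            cases n with
            | none => simp [pvPick] at hne
            | some m =>
                simp only [pvPick] at hne
                split_ifs at hne)
        rw [this]
        simp only [List.filter_cons, decide_eq_true_eq, if_pos hx, List.foldl_cons]
      · -- x is out of range: it only enters the nearest fold
        have step : pvPickB (pvBef tx ty mn mx) (pvPhi b n) x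
            = pvPhi b (pvPick (fun p => max |p.1 - tx| |p.2 - ty|) n x) := by
          cases b with
          | some y =>
              have hy := hb y rfl
              simp only [pvPickB, pvPhi, pvBef_out_in tx ty mn mx x y hx hy]
              simp
          | none =>
              cases n with
              | none => simp [pvPickB, pvPhi, pvPick]
              | some m =>
                  have hm := hn rfl m rfl
                  simp only [pvPickB, pvPhi, pvPick, pvBef_out_out tx ty mn mx x m hx hm]
                  by_cases hd : max |x.1 - tx| |x.2 - ty| < max |m.1 - tx| |m.2 - ty| <;>
                    simp [hd]
        rw [List.foldl_cons, step]
        have := ih b (pvPick (fun p => max |p.1 - tx| |p.2 - ty|) n x) hb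
          (by
            intro hbe m' hm'
            cases n with
            | none =>
                simp [pvPick] at hm'
                exact hm' ▸ hx
            | some m =>
                have hm := hn hbe m rfl
                by_cases hd : max |x.1 - tx| |x.2 - ty| < max |m.1 - tx| |m.2 - ty|
                · simp [pvPick, hd] at hm'; exact hm' ▸ hx
                · simp [pvPick, hd] at hm'; exact hm' ▸ hm)
          (by
            intro hne
            exfalso
            cases n with
            | none => simp [pvPick] at hne
            | some m =>
                simp only [pvPick] at hne
                split_ifs at hne)
        rw [this]
        simp only [List.filter_cons, decide_eq_true_eq, if_neg hx, List.foldl_cons]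

theorem find_best_position_near_target_py_eq (target : Int × Int) (aps : List (Int × Int)) (mn mx : Int) :
    find_best_position_near_target_py target aps mn mx
      = find_best_position_near_target_py_alt target aps mn mx := by
  obtain ⟨tx, ty⟩ := target
  have hA := pvCandidates tx ty mn mx aps []
  simp only [find_best_position_near_target_py, find_best_position_near_target_py_alt]
  rw [hA, pvSorted2_eq, pvHeadFold]
  simp only [List.head?_nil, List.nil_append]
  have hmain : aps.foldl (pvPickB (pvBef tx ty mn mx)) none
      = pvPhi ((aps.filter (fun pos => decide (mn ≤ max |pos.1 - tx| |pos.2 - ty| ∧ max |pos.1 - tx| |pos.2 - ty| ≤ mx))).foldl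
            (pvPick (fun p => |max |p.1 - tx| |p.2 - ty| - (mn + 1)|)) none)
          (aps.foldl (pvPick (fun p => max |p.1 - tx| |p.2 - ty|)) none) := by
    simpa [pvPhi] using pvMain tx ty mn mx aps none none (by simp) (by simp) (by simp)
  rw [hmain]
  rw [pvFold_eq_min? (fun p : Int × Int => |max |p.1 - tx| |p.2 - ty| - (mn + 1)|),
      pvFold_eq_min? (fun p : Int × Int => max |p.1 - tx| |p.2 - ty|)]
  rw [pvMin?Map (fun pos : Int × Int => (pos, max |pos.1 - tx| |pos.2 - ty|)) (fun x => |x.2 - (mn + 1)|)]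
  simp only [Option.map_map, Function.comp_def]
  cases hm : PySem.List.min? (List.filter (fun pos => decide (mn ≤ max |pos.1 - tx| |pos.2 - ty| ∧ max |pos.1 - tx| |pos.2 - ty| ≤ mx)) aps) (fun x => |max |x.1 - tx| |x.2 - ty| - (mn + 1)|) with
  | none =>
      have hfe := (PySem.List.min?_eq_none_iff (List.filter (fun pos => decide (mn ≤ max |pos.1 - tx| |pos.2 - ty| ∧ max |pos.1 - tx| |pos.2 - ty| ≤ mx)) aps) (fun x => |max |x.1 - tx| |x.2 - ty| - (mn + 1)|)).mp hm
      simp only [hfe, List.map_nil, ne_eq, not_true_eq_false, if_false, Option.map_none, pvPhi]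
      by_cases haps : aps = []
      · subst haps; rfl
      · simp [haps, PySem.List.min?]
  | some m =>
      have hne : List.filter (fun pos => decide (mn ≤ max |pos.1 - tx| |pos.2 - ty| ∧ max |pos.1 - tx| |pos.2 - ty| ≤ mx)) aps ≠ [] := by
        intro h
        rw [h] at hm
        simp [PySem.List.min?] at hm
      have hmap : List.map (fun pos => (pos, max |pos.1 - tx| |pos.2 - ty|)) (List.filter (fun pos => decide (mn ≤ max |pos.1 - tx| |pos.2 - ty| ∧ max |pos.1 - tx| |pos.2 - ty| ≤ mx)) aps) ≠ [] := by
        simpa [List.map_eq_nil_iff] using hne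
      rw [if_pos hmap]
      simp [pvPhi]

-- ===== VERDICT (by name: the statement is the Claim_ definition above) =====
theorem find_best_position_near_target_py_spec : Claim_equal_find_best_position_near_target_py := by
  intro target aps mn mx _
  unfold Spec_find_best_position_near_target_py
  exact find_best_position_near_target_py_eq target aps mn mx
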